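-- pv_equiv track=rewrite | github.com/SSC-MAX/SRTWM | nlp-watermarking-main/Multi-NLP-BER.py | merge_extracted_messages
-- ===== SOURCE A (Python) =====
-- def merge_extracted_messages(items):
--     # 取最大长度
--     max_len = max(len(item) for item in items[0])
--
--     result = []
--     for col in range(max_len):
--         ones = zeros = 0
--
--         for item in items[0]:
--             msg = item
--             if col < len(msg):
--                 if msg[col] == 1:
--                     ones += 1
--                 else:
--                     zeros += 1
--
--         # 取多数（若相等，这里默认取 1）
--         result.append(1 if ones >= zeros else 0)
--
--     return result
-- ===== SOURCE B (Python) =====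
-- def merge_extracted_messages(items):
--     ones = []
--     reach = []
--     for msg in items[0]:
--         if len(msg) > len(ones):
--             pad = len(msg) - len(ones)
--             ones.extend([0] * pad)
--             reach.extend([0] * pad)
--         for j, v in enumerate(msg):
--             reach[j] += 1
--             if v == 1:
--                 ones[j] += 1
--     return [1 if 2 * o >= r else 0 for o, r in zip(ones, reach)]
-- ===== Notes on version B (the rewrite author's own statement) =====
-- stated objective: alternative
-- what changed: Instead of rescanning all messages once per column (outer loop over range(max_len)), B makes a single pass over the messages, maintaining per-column one-counts and reach-counts in growing arrays, and derives the majority from 2*ones >= reach.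
import Mathlib
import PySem

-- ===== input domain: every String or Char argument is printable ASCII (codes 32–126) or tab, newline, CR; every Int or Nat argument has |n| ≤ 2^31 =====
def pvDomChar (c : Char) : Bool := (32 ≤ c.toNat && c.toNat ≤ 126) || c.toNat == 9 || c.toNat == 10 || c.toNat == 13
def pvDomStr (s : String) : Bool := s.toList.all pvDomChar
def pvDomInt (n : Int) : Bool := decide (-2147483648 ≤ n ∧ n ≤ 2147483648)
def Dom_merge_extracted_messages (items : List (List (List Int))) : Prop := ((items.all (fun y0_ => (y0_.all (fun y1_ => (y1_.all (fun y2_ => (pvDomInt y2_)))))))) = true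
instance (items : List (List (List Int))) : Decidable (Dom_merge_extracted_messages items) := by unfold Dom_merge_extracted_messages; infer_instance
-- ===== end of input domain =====

-- B replaces A's per-column rescan of all messages by a single pass over the messages that
-- maintains per-column one-counts and reach-counts (objective: alternative traversal order).

-- ===== PORT A =====
def merge_extracted_messages (items : List (List (List Int))) : List Int :=
  let msgs := items.headD []
  -- Python `max(len(item) for item in items[0])`: exact under Pre_ (msgs ≠ []), since
  -- lengths are ≥ 0 the extra 0 seed of the fold does not change the maximum.
  let maxLen : Nat := (msgs.map List.length).foldl max 0
  (List.range maxLen).foldl (fun result col =>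
    let oz := msgs.foldl (fun (oz : Int × Int) msg =>
      if col < msg.length then
        if msg.getD col 0 == 1 then (oz.1 + 1, oz.2) else (oz.1, oz.2 + 1)
      else oz) ((0 : Int), (0 : Int))
    result ++ [if oz.1 ≥ oz.2 then (1 : Int) else 0]) []

-- ===== PORT B =====
-- one message folded into the (ones, reach) accumulators positionally
-- (Source B's zero-padding `extend` + indexed `+=` loop, expressed structurally)
def pvMerge1 : List Int → List Int → List Int → List Int × List Int
  | [], ones, reach => (ones, reach)
  | v :: ms, ones, reach =>
    let p := pvMerge1 ms ones.tail reach.tail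
    ((ones.headD 0 + (if v == 1 then 1 else 0)) :: p.1, (reach.headD 0 + 1) :: p.2)

def merge_extracted_messages_alt (items : List (List (List Int))) : List Int :=
  let msgs := items.headD []
  let orr := msgs.foldl (fun (p : List Int × List Int) msg => pvMerge1 msg p.1 p.2) ([], [])
  (orr.1.zip orr.2).map (fun p => if 2 * p.1 ≥ p.2 then (1 : Int) else 0)

-- ===== PRECONDITION & SPEC =====
-- Pre_ excludes exactly the inputs on which A raises: empty items (IndexError on items[0])
-- and empty items[0] (ValueError: max() of an empty sequence).
def Pre_merge_extracted_messages (items : List (List (List Int))) : Prop :=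
  items ≠ [] ∧ items.headD [] ≠ []
instance (items : List (List (List Int))) : Decidable (Pre_merge_extracted_messages items) := by
  unfold Pre_merge_extracted_messages; infer_instance

def pvWitness_merge_extracted_messages : List (List (List Int)) := [[[1, 0], [0, 0]]]

def Spec_merge_extracted_messages (items : List (List (List Int))) (out : List Int) : Prop := out = merge_extracted_messages_alt items
instance (items : List (List (List Int))) (out : List Int) : Decidable (Spec_merge_extracted_messages items out) := by unfold Spec_merge_extracted_messages; infer_instance

-- ===== CLAIM (what is proved, stated in full; the proofs are below) =====
def Claim_equal_merge_extracted_messages : Prop := ∀ (items : List (List (List Int))), Dom_merge_extracted_messages items → Pre_merge_extracted_messages items → Spec_merge_extracted_messages items (merge_extracted_messages items)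

-- ===== LEMMAS AND PROOFS =====

-- per-column counts: number of 1s seen at column j, and number of non-1s seen at column j
def pvCnt1 (msgs : List (List Int)) (j : Nat) : Int :=
  (msgs.map (fun m => if j < m.length then (if m.getD j 0 = 1 then (1 : Int) else 0) else 0)).sum
def pvCnt0 (msgs : List (List Int)) (j : Nat) : Int :=
  (msgs.map (fun m => if j < m.length then (if m.getD j 0 = 1 then (0 : Int) else 1) else 0)).sum

theorem pv_getD_tail {α : Type} (l : List α) (j : Nat) (d : α) :
    l.tail.getD j d = l.getD (j + 1) d := by
  cases l <;> simp

theorem pvMerge1_len1 (msg : List Int) : ∀ ones reach,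
    (pvMerge1 msg ones reach).1.length = max msg.length ones.length := by
  induction msg with
  | nil => intro ones reach; simp [pvMerge1]
  | cons v ms ih =>
    intro ones reach
    simp [pvMerge1, ih]
    cases ones <;> simp

theorem pvMerge1_len2 (msg : List Int) : ∀ ones reach,
    (pvMerge1 msg ones reach).2.length = max msg.length reach.length := by
  induction msg with
  | nil => intro ones reach; simp [pvMerge1]
  | cons v ms ih =>
    intro ones reach
    simp [pvMerge1, ih]
    cases reach <;> simp

theorem pvMerge1_get1 (msg : List Int) : ∀ ones reach j,
    (pvMerge1 msg ones reach).1.getD j 0 =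
      ones.getD j 0 + (if j < msg.length then (if msg.getD j 0 = 1 then (1 : Int) else 0) else 0) := by
  induction msg with
  | nil => intro ones reach j; simp [pvMerge1]
  | cons v ms ih =>
    intro ones reach j
    cases j with
    | zero =>
      simp [pvMerge1]
      cases ones <;> simp
    | succ j =>
      simp only [pvMerge1, List.getD_cons_succ, List.length_cons, Nat.add_lt_add_iff_right]
      rw [ih, pv_getD_tail]

theorem pvMerge1_get2 (msg : List Int) : ∀ ones reach j,
    (pvMerge1 msg ones reach).2.getD j 0 =
      reach.getD j 0 + (if j < msg.length then (1 : Int) else 0) := by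
  induction msg with
  | nil => intro ones reach j; simp [pvMerge1]
  | cons v ms ih =>
    intro ones reach j
    cases j with
    | zero =>
      simp [pvMerge1]
      cases reach <;> simp
    | succ j =>
      simp only [pvMerge1, List.getD_cons_succ, List.length_cons, Nat.add_lt_add_iff_right]
      rw [ih, pv_getD_tail]

-- the big fold of B, abbreviated
def pvFoldB (msgs : List (List Int)) (p : List Int × List Int) : List Int × List Int :=
  msgs.foldl (fun (p : List Int × List Int) msg => pvMerge1 msg p.1 p.2) p

theorem pvFoldB_len1 (msgs : List (List Int)) : ∀ p : List Int × List Int,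
    (pvFoldB msgs p).1.length = msgs.foldl (fun a m => max m.length a) p.1.length := by
  induction msgs with
  | nil => intro p; simp [pvFoldB]
  | cons m ms ih =>
    intro p
    simp only [pvFoldB, List.foldl_cons] at *
    rw [ih, pvMerge1_len1]

theorem pvFoldB_len2 (msgs : List (List Int)) : ∀ p : List Int × List Int,
    (pvFoldB msgs p).2.length = msgs.foldl (fun a m => max m.length a) p.2.length := by
  induction msgs with
  | nil => intro p; simp [pvFoldB]
  | cons m ms ih =>
    intro p
    simp only [pvFoldB, List.foldl_cons] at *
    rw [ih, pvMerge1_len2]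

theorem pvFoldB_get1 (msgs : List (List Int)) : ∀ (p : List Int × List Int) (j : Nat),
    (pvFoldB msgs p).1.getD j 0 = p.1.getD j 0 + pvCnt1 msgs j := by
  induction msgs with
  | nil => intro p j; simp [pvFoldB, pvCnt1]
  | cons m ms ih =>
    intro p j
    simp only [pvFoldB, List.foldl_cons] at *
    rw [ih, pvMerge1_get1]
    simp only [pvCnt1, List.map_cons, List.sum_cons]
    ring

theorem pvFoldB_get2 (msgs : List (List Int)) : ∀ (p : List Int × List Int) (j : Nat),
    (pvFoldB msgs p).2.getD j 0 = p.2.getD j 0 + pvCnt1 msgs j + pvCnt0 msgs j := by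
  induction msgs with
  | nil => intro p j; simp [pvFoldB, pvCnt1, pvCnt0]
  | cons m ms ih =>
    intro p j
    simp only [pvFoldB, List.foldl_cons] at *
    rw [ih, pvMerge1_get2]
    simp only [pvCnt1, pvCnt0, List.map_cons, List.sum_cons]
    split_ifs <;> ring

-- A's inner loop computes exactly the two per-column counts
theorem pv_innerA (msgs : List (List Int)) (col : Nat) : ∀ a b : Int,
    msgs.foldl (fun (oz : Int × Int) msg =>
      if col < msg.length then
        if msg.getD col 0 == 1 then (oz.1 + 1, oz.2) else (oz.1, oz.2 + 1)
      else oz) (a, b) = (a + pvCnt1 msgs col, b + pvCnt0 msgs col) := by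
  induction msgs with
  | nil => intro a b; simp [pvCnt1, pvCnt0]
  | cons m ms ih =>
    intro a b
    simp only [List.foldl_cons]
    by_cases h1 : col < m.length
    · by_cases h2 : m.getD col 0 = 1
      · rw [if_pos h1, if_pos (by simpa using h2), ih]
        simp only [pvCnt1, pvCnt0, List.map_cons, List.sum_cons, if_pos h1, if_pos h2,
          Prod.mk.injEq]
        constructor <;> ring
      · rw [if_pos h1, if_neg (by simpa using h2), ih]
        simp only [pvCnt1, pvCnt0, List.map_cons, List.sum_cons, if_pos h1, if_neg h2,
          Prod.mk.injEq]
        constructor <;> ring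
    · rw [if_neg h1, ih]
      simp only [pvCnt1, pvCnt0, List.map_cons, List.sum_cons, if_neg h1, Prod.mk.injEq]
      constructor <;> ring

theorem pv_foldl_append_map {α β : Type} (l : List α) (f : α → β) : ∀ acc : List β,
    l.foldl (fun r c => r ++ [f c]) acc = acc ++ l.map f := by
  induction l with
  | nil => intro acc; simp
  | cons x xs ih => intro acc; simp [ih]

theorem pv_maxfold (msgs : List (List Int)) : ∀ n : Nat,
    msgs.foldl (fun a m => max m.length a) n = (msgs.map List.length).foldl max n := by
  induction msgs with
  | nil => intro n; simp
  | cons m ms ih => intro n; simp only [List.foldl_cons, List.map_cons]; rw [ih, Nat.max_comm]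

-- ===== VERDICT (by name: the statement is the Claim_ definition above) =====
theorem merge_extracted_messages_spec : Claim_equal_merge_extracted_messages := by
  intro items _dom _pre
  unfold Spec_merge_extracted_messages merge_extracted_messages merge_extracted_messages_alt
  rw [pv_foldl_append_map]
  simp only [List.nil_append]
  generalize items.headD [] = msgs
  rw [show List.foldl (fun (p : List Int × List Int) msg => pvMerge1 msg p.1 p.2) ([], []) msgs
      = pvFoldB msgs ([], []) from rfl]
  have hO : (pvFoldB msgs ([], [])).1.length = (msgs.map List.length).foldl max 0 := by
    rw [pvFoldB_len1]; simpa using pv_maxfold msgs 0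
  have hR : (pvFoldB msgs ([], [])).2.length = (msgs.map List.length).foldl max 0 := by
    rw [pvFoldB_len2]; simpa using pv_maxfold msgs 0
  apply List.ext_getElem
  · simp [hO, hR]
  · intro j hj1 hj2
    have hjm : j < (msgs.map List.length).foldl max 0 := by simpa using hj1
    have hjO : j < (pvFoldB msgs ([], [])).1.length := by rw [hO]; exact hjm
    have hjR : j < (pvFoldB msgs ([], [])).2.length := by rw [hR]; exact hjm
    simp only [List.getElem_map, List.getElem_range, List.getElem_zip]
    rw [pv_innerA]
    rw [show (pvFoldB msgs ([], [])).1[j] = (pvFoldB msgs ([], [])).1.getD j 0 from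
        (List.getD_eq_getElem _ 0 hjO).symm]
    rw [show (pvFoldB msgs ([], [])).2[j] = (pvFoldB msgs ([], [])).2.getD j 0 from
        (List.getD_eq_getElem _ 0 hjR).symm]
    rw [pvFoldB_get1, pvFoldB_get2]
    simp only [List.getD_nil, zero_add]
    have h : (pvCnt0 msgs j ≤ pvCnt1 msgs j) ↔
        (pvCnt1 msgs j + pvCnt0 msgs j ≤ 2 * pvCnt1 msgs j) := by omega
    simp only [ge_iff_le]
    by_cases h1 : pvCnt0 msgs j ≤ pvCnt1 msgs j
    · rw [if_pos h1, if_pos (h.mp h1)]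
    · rw [if_neg h1, if_neg (fun c => h1 (h.mpr c))]
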